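-- pv_equiv track=rewrite | github.com/ReCreatem3-ui/python_coding_challenges | batch6/prog4_make_program_with_same_functionality_as_isupper()_without_using_it.py | manual_isupper
-- ===== SOURCE A (Python) =====
-- def manual_isupper(string):
--     has_alpha = False
--     for char in string:
--         if 'a' <= char <= 'z':
--             return False
--         if 'A' <= char <= 'Z':
--             has_alpha = True
--     return has_alpha
-- ===== SOURCE B (Python) =====
-- def manual_isupper(string):
--     chars = set(string)
--     uppers = chars & set("ABCDEFGHIJKLMNOPQRSTUVWXYZ")
--     lowers = chars & set("abcdefghijklmnopqrstuvwxyz")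
--     return bool(uppers) and not lowers
-- ===== Notes on version B (the rewrite author's own statement) =====
-- stated objective: idiomatic
-- what changed: Replaces the flagged early-exit character loop with set algebra: materialize the distinct characters once and decide the result by intersecting with the uppercase and lowercase alphabets.
import Mathlib
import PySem

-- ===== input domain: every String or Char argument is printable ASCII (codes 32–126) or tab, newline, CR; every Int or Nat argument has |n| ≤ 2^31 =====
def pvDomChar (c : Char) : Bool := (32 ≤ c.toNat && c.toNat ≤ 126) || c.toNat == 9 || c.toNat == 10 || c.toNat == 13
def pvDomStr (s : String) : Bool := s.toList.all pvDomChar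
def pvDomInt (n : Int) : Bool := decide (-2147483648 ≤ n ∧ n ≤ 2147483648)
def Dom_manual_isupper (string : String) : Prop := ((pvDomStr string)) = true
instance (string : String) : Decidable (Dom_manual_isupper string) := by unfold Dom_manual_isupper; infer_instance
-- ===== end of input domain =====

-- B replaces A's flagged early-exit loop with set algebra over the distinct characters (idiomatic; same cost).


-- ===== PORT A =====
-- the for-loop with the has_alpha flag and the early 'return False'
def manualIsupperLoop (hasAlpha : Bool) : List Char → Bool
  | [] => hasAlpha
  | c :: cs =>
    if 'a' ≤ c ∧ c ≤ 'z' then false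
    else if 'A' ≤ c ∧ c ≤ 'Z' then manualIsupperLoop true cs
    else manualIsupperLoop hasAlpha cs

def manual_isupper (string : String) : Bool :=
  manualIsupperLoop false string.toList

-- ===== PORT B =====
def manual_isupper_alt (string : String) : Bool :=
  let chars : PySem.Set Char := PySem.Set.ofList string.toList
  let uppers := PySem.Set.inter chars ("ABCDEFGHIJKLMNOPQRSTUVWXYZ".toList)
  let lowers := PySem.Set.inter chars ("abcdefghijklmnopqrstuvwxyz".toList)
  !uppers.isEmpty && lowers.isEmpty

-- ===== PRECONDITION & SPEC =====
def Spec_manual_isupper (string : String) (out : Bool) : Prop := out = manual_isupper_alt string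
instance (string : String) (out : Bool) : Decidable (Spec_manual_isupper string out) := by unfold Spec_manual_isupper; infer_instance

-- ===== CLAIM (what is proved, stated in full; the proofs are below) =====
def Claim_equal_manual_isupper : Prop := ∀ (string : String), Dom_manual_isupper string → Spec_manual_isupper string (manual_isupper string)

-- ===== LEMMAS AND PROOFS =====
theorem mem_upper_iff (c : Char) :
    c ∈ ("ABCDEFGHIJKLMNOPQRSTUVWXYZ".toList) ↔ ('A' ≤ c ∧ c ≤ 'Z') := by
  have h : ("ABCDEFGHIJKLMNOPQRSTUVWXYZ".toList)
      = ['A','B','C','D','E','F','G','H','I','J','K','L','M','N','O','P','Q','R','S','T','U','V','W','X','Y','Z'] := rfl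
  rw [h]
  simp [List.mem_cons, Char.ext_iff, UInt32.ext_iff, Char.le_def, UInt32.le_iff_toNat_le]
  omega

theorem mem_lower_iff (c : Char) :
    c ∈ ("abcdefghijklmnopqrstuvwxyz".toList) ↔ ('a' ≤ c ∧ c ≤ 'z') := by
  have h : ("abcdefghijklmnopqrstuvwxyz".toList)
      = ['a','b','c','d','e','f','g','h','i','j','k','l','m','n','o','p','q','r','s','t','u','v','w','x','y','z'] := rfl
  rw [h]
  simp [List.mem_cons, Char.ext_iff, UInt32.ext_iff, Char.le_def, UInt32.le_iff_toNat_le]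
  omega

theorem loop_char (b : Bool) (l : List Char) :
    manualIsupperLoop b l =
      ((b || l.any (fun c => decide ('A' ≤ c ∧ c ≤ 'Z'))) &&
       !(l.any (fun c => decide ('a' ≤ c ∧ c ≤ 'z')))) := by
  induction l generalizing b with
  | nil => simp [manualIsupperLoop]
  | cons c cs ih =>
    simp only [manualIsupperLoop, List.any_cons]
    by_cases hl : 'a' ≤ c ∧ c ≤ 'z'
    · rw [if_pos hl, decide_eq_true hl]; simp
    · rw [if_neg hl, decide_eq_false hl]
      by_cases hu : 'A' ≤ c ∧ c ≤ 'Z'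
      · rw [if_pos hu, decide_eq_true hu, ih]; simp
      · rw [if_neg hu, decide_eq_false hu, ih]; simp

theorem inter_isEmpty (l T : List Char) :
    (PySem.Set.inter (PySem.Set.ofList l) T).isEmpty
      = !(l.any (fun c => decide (c ∈ T))) := by
  rw [Bool.eq_iff_iff]
  simp [List.isEmpty_iff, List.eq_nil_iff_forall_not_mem, PySem.Set.mem_inter,
    PySem.Set.mem_ofList]

-- ===== VERDICT (by name: the statement is the Claim_ definition above) =====
theorem manual_isupper_spec : Claim_equal_manual_isupper := by
  intro s _
  show manualIsupperLoop false s.toList =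
    (!(PySem.Set.inter (PySem.Set.ofList s.toList) ("ABCDEFGHIJKLMNOPQRSTUVWXYZ".toList)).isEmpty
      && (PySem.Set.inter (PySem.Set.ofList s.toList) ("abcdefghijklmnopqrstuvwxyz".toList)).isEmpty)
  have hU : (fun c : Char => decide (c ∈ "ABCDEFGHIJKLMNOPQRSTUVWXYZ".toList))
      = (fun c : Char => decide ('A' ≤ c ∧ c ≤ 'Z')) :=
    funext fun c => decide_eq_decide.2 (mem_upper_iff c)
  have hL : (fun c : Char => decide (c ∈ "abcdefghijklmnopqrstuvwxyz".toList))
      = (fun c : Char => decide ('a' ≤ c ∧ c ≤ 'z')) :=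
    funext fun c => decide_eq_decide.2 (mem_lower_iff c)
  rw [loop_char, inter_isEmpty, inter_isEmpty, hU, hL, Bool.not_not, Bool.false_or]
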